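-- pv_equiv track=rewrite | github.com/elvispy/PESolutions | Problems101-200/PE191.py | F
-- ===== SOURCE A (Python) =====
-- def F(n, bol = True) -> int:
--     """This function returns the number of acceptable strings that
--     can be awarded with the prize in an n-day semester.
--     """
--     res = 0
--     #Here some base cases
--     if n == 0:
--         return 1
--     elif n == 1:
--         if bol:
--             return 3
--         else:
--             return 2
--     elif n == 2:
--         if bol:
--             return 8
--         else:
--             return 4
--     elif n == 3:
--         if bol:
--             return 22
--         else:
--             return 7
--
--
--     if bol:
--         #First we count the strings with one late arrival
--
--         for i in range(n):
--             res += F(i, False) * F(n-1-i, False)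
--
--         #Now strings with no late arrivals.
--         res += F(n, False)
--
--         return res
--     else:
--         #Recursion rules!
--         return 2*F(n-1, False) - F(n-4, False)
-- ===== SOURCE B (Python) =====
-- def F(n, bol=True) -> int:
--     """Iterative O(n) DP table for the no-late counts, then one convolution pass."""
--     if n == 0:
--         return 1
--     f = [1, 2, 4, 7]
--     for k in range(4, n + 1):
--         f.append(2 * f[k - 1] - f[k - 4])
--     if bol:
--         return sum(f[i] * f[n - 1 - i] for i in range(n)) + f[n]
--     return f[n]
-- ===== Notes on version B (the rewrite author's own statement) =====
-- stated objective: faster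
-- what changed: Replaces the exponential unmemoized recursion with an iterative DP table of the no-late counts built once, followed by a single convolution pass over that table.
-- intended difference: On n=3 with bol=True, A's hardcoded base case returns 22 while B's general convolution formula returns 19, the correct number of acceptable 3-day prize strings (A's own recursion would also yield 19 had the base case not shadowed it). — e.g. on F(3, true): A returns 22, B returns 19
import Mathlib
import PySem

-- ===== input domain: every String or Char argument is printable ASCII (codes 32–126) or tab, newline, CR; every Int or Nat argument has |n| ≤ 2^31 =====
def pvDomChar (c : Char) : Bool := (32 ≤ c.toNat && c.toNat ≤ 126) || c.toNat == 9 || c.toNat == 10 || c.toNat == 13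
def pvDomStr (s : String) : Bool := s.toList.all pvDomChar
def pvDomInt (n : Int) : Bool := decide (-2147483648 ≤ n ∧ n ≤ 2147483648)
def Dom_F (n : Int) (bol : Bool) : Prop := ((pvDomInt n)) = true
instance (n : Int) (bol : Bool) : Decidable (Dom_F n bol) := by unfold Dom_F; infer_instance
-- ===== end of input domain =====

-- B replaces A's unmemoized exponential recursion by an iterative DP table plus one
-- convolution pass; B fixes A's hardcoded value 22 at (n=3, bol=True) to the correct 19 (see D_F).

-- ===== PORT A =====
-- A's recursion transcribed on Nat (Pre_F demands 0 ≤ n, where Int.toNat is exact; for n < 0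
-- Python A raises RecursionError). `for i in range(n)` is a foldl over (List.range n).attach
-- (.attach only carries the bound needed for termination; the state and steps are A's).
def FAux : Nat → Bool → Int
  | 0, _ => 1
  | 1, b => if b then 3 else 2
  | 2, b => if b then 8 else 4
  | 3, b => if b then 22 else 7
  | n + 4, true =>
      ((List.range (n + 4)).attach.foldl
        (fun res i => res + FAux i.1 false * FAux (n + 3 - i.1) false) 0)
      + FAux (n + 4) false
  | n + 4, false => 2 * FAux (n + 3) false - FAux n false
termination_by n b => (n, if b then 1 else 0)
decreasing_by
  · exact Prod.Lex.left _ _ (by have := i.2; simp only [List.mem_range] at this; omega)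
  · exact Prod.Lex.left _ _ (by omega)
  · exact Prod.Lex.right _ (by simp)
  · exact Prod.Lex.left _ _ (by omega)
  · exact Prod.Lex.left _ _ (by omega)

def F (n : Int) (bol : Bool) : Int := FAux n.toNat bol

-- ===== PORT B =====
def F_alt (n : Int) (bol : Bool) : Int :=
  if n = 0 then 1
  else
    let f := (PySem.List.pyRange 4 (n + 1) 1).foldl
      (fun f k => f ++ [2 * PySem.List.pyGetD f (k - 1) 0 - PySem.List.pyGetD f (k - 4) 0])
      [1, 2, 4, 7]
    if bol then
      ((PySem.List.pyRange 0 n 1).foldl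
        (fun s i => s + PySem.List.pyGetD f i 0 * PySem.List.pyGetD f (n - 1 - i) 0) 0)
      + PySem.List.pyGetD f n 0
    else
      PySem.List.pyGetD f n 0

-- ===== PRECONDITION & SPEC =====
-- Pre_F: Python A recurses without bound (RecursionError) for n < 0.
def Pre_F (n : Int) (bol : Bool) : Prop := 0 ≤ n
instance (n : Int) (bol : Bool) : Decidable (Pre_F n bol) := by unfold Pre_F; infer_instance
def pvWitness_F : Int × Bool := (5, true)

-- On n=3 with bol=True, A's hardcoded base case returns 22 while B's general convolution
-- formula returns 19, the correct count of acceptable 3-day prize strings (A's own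
-- recursion would also give 19 had the base case not shadowed it).
def D_F (n : Int) (bol : Bool) : Prop := n = 3 ∧ bol = true
instance (n : Int) (bol : Bool) : Decidable (D_F n bol) := by unfold D_F; infer_instance

def Spec_F (n : Int) (bol : Bool) (out : Int) : Prop := ¬ D_F n bol → out = F_alt n bol
instance (n : Int) (bol : Bool) (out : Int) : Decidable (Spec_F n bol out) := by unfold Spec_F; infer_instance

def pvDiffWitness_F : Int × Bool := (3, true)
def pvDiffWitnessOut_F : Int × Int := (22, 19)

-- ===== CLAIM (what is proved, stated in full; the proofs are below) =====
def Claim_unchanged_F : Prop := ∀ (n : Int) (bol : Bool), Dom_F n bol → Pre_F n bol → Spec_F n bol (F n bol)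
def Claim_changed_F : Prop := Dom_F (pvDiffWitness_F.1) (pvDiffWitness_F.2) ∧ Pre_F (pvDiffWitness_F.1) (pvDiffWitness_F.2) ∧ D_F (pvDiffWitness_F.1) (pvDiffWitness_F.2) ∧ F (pvDiffWitness_F.1) (pvDiffWitness_F.2) = pvDiffWitnessOut_F.1 ∧ F_alt (pvDiffWitness_F.1) (pvDiffWitness_F.2) = pvDiffWitnessOut_F.2 ∧ pvDiffWitnessOut_F.1 ≠ pvDiffWitnessOut_F.2
def Claim_exact_F : Prop := ∀ (n : Int) (bol : Bool), Dom_F n bol → Pre_F n bol → D_F n bol → F n bol ≠ F_alt n bol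

-- ===== LEMMAS AND PROOFS =====

-- the no-late sequence (A's bol=False values)
def gSeq (k : Nat) : Int := FAux k false

theorem gSeq_zero : gSeq 0 = 1 := by rw [gSeq, FAux]
theorem gSeq_one : gSeq 1 = 2 := by rw [gSeq, FAux]; rfl
theorem gSeq_two : gSeq 2 = 4 := by rw [gSeq, FAux]; rfl
theorem gSeq_three : gSeq 3 = 7 := by rw [gSeq, FAux]; rfl
theorem gSeq_rec (m : Nat) : gSeq (m + 4) = 2 * gSeq (m + 3) - gSeq m := by
  rw [gSeq, FAux]; rfl

-- B's DP table equals the no-late sequence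
theorem build_eq (m : Nat) :
    (PySem.List.pyRange 4 ((4 + m : Nat) : Int) 1).foldl
      (fun f k => f ++ [2 * PySem.List.pyGetD f (k - 1) 0 - PySem.List.pyGetD f (k - 4) 0])
      [1, 2, 4, 7]
    = (List.range (4 + m)).map gSeq := by
  induction m with
  | zero =>
      rw [PySem.List.pyRange_one_eq_nil (by norm_num)]
      simp [List.range_succ, gSeq_zero, gSeq_one, gSeq_two, gSeq_three]
  | succ m ih =>
      have hcast : ((4 + (m + 1) : Nat) : Int) = ((4 + m : Nat) : Int) + 1 := by push_cast; ring
      rw [hcast, PySem.List.pyRange_one_succ_right (by push_cast; omega), List.foldl_append, ih]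
      have h1 : ((4 + m : Nat) : Int) - 1 = ((3 + m : Nat) : Int) := by push_cast; ring
      have h4 : ((4 + m : Nat) : Int) - 4 = ((m : Nat) : Int) := by push_cast; ring
      simp only [List.foldl_cons, List.foldl_nil, h1, h4, PySem.List.pyGetD_natCast]
      rw [PySem.List.getD_map_range gSeq _ _ _ (by omega), PySem.List.getD_map_range gSeq _ _ _ (by omega)]
      have : 4 + (m + 1) = (4 + m) + 1 := by omega
      rw [this, List.range_succ, List.map_append]
      have : gSeq (4 + m) = 2 * gSeq (3 + m) - gSeq m := by
        have := gSeq_rec m; rw [show m + 4 = 4 + m by omega, show m + 3 = 3 + m by omega] at this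
        exact this
      simp [this]

theorem main_eq (N : Nat) (bol : Bool) (h : ¬ (N = 3 ∧ bol = true)) :
    FAux N bol = F_alt (N : Int) bol := by
  match N, bol with
  | 0, b => rw [FAux]; simp [F_alt]
  | 1, true => rw [FAux]; decide
  | 1, false => rw [FAux]; decide
  | 2, true => rw [FAux]; decide
  | 2, false => rw [FAux]; decide
  | 3, true => exact absurd ⟨rfl, rfl⟩ h
  | 3, false => rw [FAux]; decide
  | (m + 4), bol =>
    -- the table
    have hne : ((m + 4 : Nat) : Int) ≠ 0 := by push_cast; omega
    have hb : (((m + 4 : Nat) : Int) + 1) = ((4 + (m + 1) : Nat) : Int) := by push_cast; ring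
    have htab : (PySem.List.pyRange 4 (((m + 4 : Nat) : Int) + 1) 1).foldl
        (fun f k => f ++ [2 * PySem.List.pyGetD f (k - 1) 0 - PySem.List.pyGetD f (k - 4) 0])
        [1, 2, 4, 7] = (List.range (m + 5)).map gSeq := by
      rw [hb, build_eq]; norm_num [show 4 + (m + 1) = m + 5 by omega]
    cases bol with
    | false =>
        rw [FAux]
        show 2 * FAux (m + 3) false - FAux m false = F_alt _ false
        rw [F_alt]
        simp only [if_neg hne, htab]
        rw [PySem.List.pyGetD_natCast, PySem.List.getD_map_range gSeq _ _ _ (by omega)]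
        rw [if_neg (by decide : ¬ (false = true)), gSeq_rec m]; rfl
    | true =>
        rw [FAux]
        show ((List.range (m + 4)).attach.foldl
            (fun res i => res + FAux i.1 false * FAux (m + 3 - i.1) false) 0)
            + FAux (m + 4) false = F_alt _ true
        rw [F_alt]
        simp only [if_neg hne, htab, if_true]
        -- A-side sum
        rw [List.foldl_attach (f := fun res j => res + FAux j false * FAux (m + 3 - j) false)]
        -- B-side sum
        rw [PySem.List.pyRange_zero_nat (m + 4), List.foldl_map]
        have hcong : List.foldl
            (fun s (i : Nat) => s + PySem.List.pyGetD ((List.range (m + 5)).map gSeq) (i : Int) 0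
              * PySem.List.pyGetD ((List.range (m + 5)).map gSeq) (((m + 4 : Nat) : Int) - 1 - (i : Int)) 0)
            0 (List.range (m + 4))
            = List.foldl (fun res i => res + gSeq i * gSeq (m + 3 - i)) 0 (List.range (m + 4)) := by
          apply PySem.List.foldl_congr_mem
          intro acc i hi
          simp only [List.mem_range] at hi
          have h1 : ((m + 4 : Nat) : Int) - 1 - (i : Int) = ((m + 3 - i : Nat) : Int) := by
            push_cast [show i ≤ m + 3 by omega]; ring
          rw [h1, PySem.List.pyGetD_natCast, PySem.List.pyGetD_natCast,
            PySem.List.getD_map_range gSeq _ _ _ (by omega), PySem.List.getD_map_range gSeq _ _ _ (by omega)]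
        rw [hcong, PySem.List.pyGetD_natCast, PySem.List.getD_map_range gSeq _ _ _ (by omega)]
        rfl

-- ===== VERDICT (by name: the statement is the Claim_ definition above) =====
theorem F_spec : Claim_unchanged_F := by
  intro n bol _ hpre hD
  have hN : n = ((n.toNat : Nat) : Int) := (Int.toNat_of_nonneg hpre).symm
  rw [F, hN]
  apply main_eq
  rintro ⟨h3, hb⟩
  exact hD ⟨by omega, hb⟩

theorem F_changed : Claim_changed_F := by
  unfold Claim_changed_F
  refine ⟨by decide, by decide, by decide, ?_, by decide, by decide⟩
  show F 3 true = 22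
  rw [F, show (3 : Int).toNat = 3 from rfl, FAux]; decide

theorem F_tight : Claim_exact_F := by
  intro n bol _ _ hD
  obtain ⟨rfl, rfl⟩ := hD
  have hA : F 3 true = 22 := by rw [F, show (3 : Int).toNat = 3 from rfl, FAux]; decide
  have hB : F_alt 3 true = 19 := by decide
  rw [hA, hB]; decide
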